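-- pv_equiv track=rewrite | github.com/payals/artifactory | artifactforge/tools/research/specialized/blog_researcher.py | _identify_content_gaps
-- ===== SOURCE A (Python) =====
-- from typing import Any
--
-- def _identify_content_gaps(
--     sources: list[dict[str, Any]], query: str
-- ) -> list[str]:
--     """Identify content gaps that new article could fill."""
--     gaps = []
--     existing_titles = [s.get("title", "").lower() for s in sources]
--
--     # Simple gap analysis based on common patterns
--     common_patterns = ["beginner", "advanced", "comparison", "vs"]
--     for pattern in common_patterns:
--         if not any(pattern in t for t in existing_titles):
--             gaps.append(f"No {pattern} guide found - potential gap")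
--
--     return gaps[:3]
-- ===== SOURCE B (Python) =====
-- def _identify_content_gaps(sources, query):
--     """Identify content gaps that new article could fill."""
--     missing = ["beginner", "advanced", "comparison", "vs"]
--     for s in sources:
--         if not missing:
--             break
--         t = s.get("title", "").lower()
--         missing = [p for p in missing if p not in t]
--     return ["No %s guide found - potential gap" % p for p in missing][:3]
-- ===== Notes on version B (the rewrite author's own statement) =====
-- stated objective: alternative
-- what changed: Replaces four independent any()-scans of a precomputed titles list by a worklist pass over the sources: the loop carries the list of still-missing patterns, filters out each pattern as soon as a title covers it and breaks early once none are missing; the surviving worklist (in original pattern order) is then formatted and sliced.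
import Mathlib
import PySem

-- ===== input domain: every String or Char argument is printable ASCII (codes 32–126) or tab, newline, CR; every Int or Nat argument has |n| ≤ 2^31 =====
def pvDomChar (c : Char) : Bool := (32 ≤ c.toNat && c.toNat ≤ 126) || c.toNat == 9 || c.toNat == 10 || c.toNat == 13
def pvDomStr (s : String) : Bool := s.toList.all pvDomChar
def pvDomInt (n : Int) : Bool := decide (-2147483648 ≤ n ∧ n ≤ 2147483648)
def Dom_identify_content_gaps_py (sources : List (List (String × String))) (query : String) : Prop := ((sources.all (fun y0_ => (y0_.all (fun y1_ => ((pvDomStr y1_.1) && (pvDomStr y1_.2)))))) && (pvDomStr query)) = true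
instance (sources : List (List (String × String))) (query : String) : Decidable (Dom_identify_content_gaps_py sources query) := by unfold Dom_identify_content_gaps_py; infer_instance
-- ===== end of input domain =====

-- B is a worklist pass over the sources carrying the still-missing patterns,
-- with early break once none are missing (alternative decomposition; same return value).


-- f"No {pattern} guide found - potential gap" (shared literal format)
def pvGapMsg (p : String) : String := "No " ++ p ++ " guide found - potential gap"

-- s.get("title", "").lower()  (shared title extraction)
def pvTitle (s : List (String × String)) : String :=
  PySem.Str.lower (PySem.Dict.getD (PySem.Dict.mk s) "title" "")

-- ===== PORT A =====
def identify_content_gaps_py (sources : List (List (String × String))) (query : String) : List String :=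
  let existing_titles := sources.map pvTitle
  let common_patterns : List String := ["beginner", "advanced", "comparison", "vs"]
  let gaps := common_patterns.foldl (fun gaps pattern =>
    if !(existing_titles.any (fun t => PySem.Str.isIn pattern t)) then
      gaps ++ [pvGapMsg pattern]
    else gaps) []
  PySem.List.slice gaps none (some 3)

-- ===== PORT B =====
-- the worklist loop over the sources: break when no pattern is missing, otherwise
-- drop the patterns covered by this source's title (structural recursion = for/break)
def pvScan : List String → List (List (String × String)) → List String
  | missing, [] => missing
  | missing, s :: ss =>
    if missing.isEmpty then missing
    else pvScan (missing.filter (fun p => !(PySem.Str.isIn p (pvTitle s)))) ss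

def identify_content_gaps_py_alt (sources : List (List (String × String))) (query : String) : List String :=
  let missing := pvScan ["beginner", "advanced", "comparison", "vs"] sources
  PySem.List.slice (missing.map pvGapMsg) none (some 3)

-- ===== PRECONDITION & SPEC =====
def Spec_identify_content_gaps_py (sources : List (List (String × String))) (query : String) (out : List String) : Prop := out = identify_content_gaps_py_alt sources query
instance (sources : List (List (String × String))) (query : String) (out : List String) : Decidable (Spec_identify_content_gaps_py sources query out) := by unfold Spec_identify_content_gaps_py; infer_instance

-- ===== CLAIM (what is proved, stated in full; the proofs are below) =====
def Claim_equal_identify_content_gaps_py : Prop := ∀ (sources : List (List (String × String))) (query : String), Dom_identify_content_gaps_py sources query → Spec_identify_content_gaps_py sources query (identify_content_gaps_py sources query)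

-- ===== LEMMAS AND PROOFS =====

-- the worklist recursion computes exactly the patterns no title of `rest` contains
theorem pvScan_eq (missing : List String) (rest : List (List (String × String))) :
    pvScan missing rest
      = missing.filter (fun p => !(rest.any (fun s => PySem.Str.isIn p (pvTitle s)))) := by
  induction rest generalizing missing with
  | nil => simp [pvScan]
  | cons s ss ih =>
      rw [pvScan]
      by_cases h : missing.isEmpty
      · rw [if_pos h]
        rw [List.isEmpty_iff] at h
        subst h; simp
      · rw [if_neg h, ih, List.filter_filter]
        apply List.filter_congr
        intro p _
        simp only [List.any_cons, Bool.not_or]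
        rw [Bool.and_comm]

-- ===== VERDICT (by name: the statement is the Claim_ definition above) =====
theorem identify_content_gaps_py_spec : Claim_equal_identify_content_gaps_py := by
  intro sources query _
  unfold Spec_identify_content_gaps_py identify_content_gaps_py identify_content_gaps_py_alt
  rw [pvScan_eq]
  simp only [PySem.List.foldl_append_if, List.nil_append]
  congr 2
  apply List.filter_congr
  intro p _
  rw [List.any_map]
  rfl
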